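-- pv_equiv track=rewrite | github.com/igamenovoer/houmao | src/houmao/agents/realm_controller/mail_commands.py | shadow_mail_result_contract_reached
-- ===== SOURCE A (Python) =====
-- from dataclasses import dataclass
--
-- MAIL_RESULT_BEGIN_SENTINEL = "HOUMAO_MAIL_RESULT_BEGIN"
--
-- MAIL_RESULT_END_SENTINEL = "HOUMAO_MAIL_RESULT_END"
--
-- @dataclass(frozen=True)
-- class SentinelBlock:
--     """One standalone sentinel-delimited result block extracted from a text surface."""
--
--     begin_line: int
--     end_line: int
--     payload_text: str
--
-- def shadow_mail_result_contract_reached(surface_payloads: tuple[dict[str, str], ...]) -> bool: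
--     """Return whether post-submit shadow surfaces contain one standalone sentinel block."""
--
--     for surface in surface_payloads:
--         text = surface.get("text")
--         if not isinstance(text, str):
--             continue
--         if not extract_sentinel_blocks(text):
--             continue
--         return True
--     return False
--
-- def extract_sentinel_blocks(text: str) -> list[SentinelBlock]:
--     """Extract standalone sentinel-delimited result blocks from *text*.
--
--     A sentinel is considered "standalone" when its line, after stripping
--     whitespace, equals the sentinel string exactly.  Sentinel names that
--     appear inside prose, JSON string values, or other inline contexts are
--     ignored.
--
--     Returns zero or more :class:`SentinelBlock` instances, each carrying
--     the raw payload text between the BEGIN and END delimiter lines.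
--     """
--
--     lines = text.splitlines()
--     blocks: list[SentinelBlock] = []
--     i = 0
--     while i < len(lines):
--         if lines[i].strip() == MAIL_RESULT_BEGIN_SENTINEL:
--             begin_line = i
--             # Scan forward for matching standalone END sentinel.
--             j = i + 1
--             while j < len(lines):
--                 if lines[j].strip() == MAIL_RESULT_END_SENTINEL:
--                     payload = "\n".join(lines[begin_line + 1 : j]).strip()
--                     blocks.append(
--                         SentinelBlock(
--                             begin_line=begin_line,
--                             end_line=j,
--                             payload_text=payload,
--                         )
--                     )
--                     i = j + 1
--                     break
--                 j += 1
--             else: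
--                 # No matching END found — skip this BEGIN.
--                 i += 1
--         else:
--             i += 1
--     return blocks
-- ===== SOURCE B (Python) =====
-- MAIL_RESULT_BEGIN_SENTINEL = "HOUMAO_MAIL_RESULT_BEGIN"
-- MAIL_RESULT_END_SENTINEL = "HOUMAO_MAIL_RESULT_END"
--
--
-- def shadow_mail_result_contract_reached(surface_payloads):
--     """Return whether post-submit shadow surfaces contain one standalone sentinel block."""
--     for surface in surface_payloads:
--         text = surface.get("text")
--         if not isinstance(text, str):
--             continue
--         seen_begin = False
--         for line in text.splitlines():
--             stripped = line.strip()
--             if stripped == MAIL_RESULT_BEGIN_SENTINEL: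
--                 seen_begin = True
--             elif stripped == MAIL_RESULT_END_SENTINEL and seen_begin:
--                 return True
--     return False
-- ===== Notes on version B (the rewrite author's own statement) =====
-- stated objective: simpler
-- what changed: Replaces the helper that builds a list of SentinelBlock records via a nested forward j-scan (plus payload slicing/join/strip) with one self-contained pass over the lines of each surface maintaining a single seen_begin flag, returning True at the first standalone END after a standalone BEGIN.
import Mathlib
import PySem

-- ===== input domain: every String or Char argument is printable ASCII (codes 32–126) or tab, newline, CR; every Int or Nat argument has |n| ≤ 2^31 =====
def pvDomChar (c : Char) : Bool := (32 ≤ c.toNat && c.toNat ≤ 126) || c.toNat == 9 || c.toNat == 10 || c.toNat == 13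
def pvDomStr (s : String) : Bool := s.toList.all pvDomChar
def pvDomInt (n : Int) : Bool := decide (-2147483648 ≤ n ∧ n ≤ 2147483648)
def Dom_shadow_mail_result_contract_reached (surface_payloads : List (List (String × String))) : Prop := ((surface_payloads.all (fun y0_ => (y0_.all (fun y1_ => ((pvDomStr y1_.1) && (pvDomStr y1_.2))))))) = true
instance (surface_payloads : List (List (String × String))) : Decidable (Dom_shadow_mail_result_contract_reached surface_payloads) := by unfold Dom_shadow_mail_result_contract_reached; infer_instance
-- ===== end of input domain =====

-- B replaces A's block-extraction helper (nested j-scan building SentinelBlock records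
-- with payload join/strip) by one pass over the lines with a single seen_begin flag (simpler).

def MAIL_RESULT_BEGIN_SENTINEL : String := "HOUMAO_MAIL_RESULT_BEGIN"
def MAIL_RESULT_END_SENTINEL : String := "HOUMAO_MAIL_RESULT_END"

-- ===== PORT A =====
-- inner `while j < len(lines)` scan for a standalone END sentinel (returns Python's break index)
def pvFindEnd (lines : List String) (j : Nat) : Option Nat :=
  if _h : j < lines.length then
    if PySem.Str.strip (lines.getD j "") = MAIL_RESULT_END_SENTINEL then some j
    else pvFindEnd lines (j + 1)
  else none
termination_by lines.length - j

theorem pvFindEnd_ge (lines : List String) (j k : Nat) (h : pvFindEnd lines j = some k) : j ≤ k := by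
  fun_induction pvFindEnd lines j with
  | case1 j hj hEnd => simp at h; omega
  | case2 j hj hEnd ih => exact Nat.le_of_succ_le (ih h)
  | case3 j hj => simp at h

-- outer `while i < len(lines)` loop of extract_sentinel_blocks (SentinelBlock ↦ (begin, end, payload))
def pvExtractLoop (lines : List String) (i : Nat) (blocks : List (Int × Int × String)) :
    List (Int × Int × String) :=
  if _h : i < lines.length then
    if PySem.Str.strip (lines.getD i "") = MAIL_RESULT_BEGIN_SENTINEL then
      match hf : pvFindEnd lines (i + 1) with
      | some j =>
          let payload := PySem.Str.strip
            (PySem.Str.join "\n" (PySem.List.slice lines (some ((i : Int) + 1)) (some (j : Int))))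
          pvExtractLoop lines (j + 1) (blocks ++ [((i : Int), (j : Int), payload)])
      | none => pvExtractLoop lines (i + 1) blocks
    else pvExtractLoop lines (i + 1) blocks
  else blocks
termination_by lines.length - i
decreasing_by
  · have := pvFindEnd_ge lines (i + 1) j hf; omega
  · omega
  · omega

def extract_sentinel_blocks (text : String) : List (Int × Int × String) :=
  pvExtractLoop (PySem.Str.splitlines text) 0 []

def shadow_mail_result_contract_reached (surface_payloads : List (List (String × String))) : Bool :=
  match surface_payloads with
  | [] => false
  | surface :: rest =>
    match (PySem.Dict.mk surface).get? "text" with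
    | none => shadow_mail_result_contract_reached rest
    | some text =>
      if extract_sentinel_blocks text = [] then shadow_mail_result_contract_reached rest
      else true

-- ===== PORT B =====
-- single pass over the lines with a seen_begin flag
def pvScanLines (lines : List String) (seen_begin : Bool) : Bool :=
  match lines with
  | [] => false
  | line :: rest =>
    let stripped := PySem.Str.strip line
    if stripped = MAIL_RESULT_BEGIN_SENTINEL then pvScanLines rest true
    else if stripped = MAIL_RESULT_END_SENTINEL ∧ seen_begin = true then true
    else pvScanLines rest seen_begin

def shadow_mail_result_contract_reached_alt (surface_payloads : List (List (String × String))) : Bool :=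
  match surface_payloads with
  | [] => false
  | surface :: rest =>
    match (PySem.Dict.mk surface).get? "text" with
    | none => shadow_mail_result_contract_reached_alt rest
    | some text =>
      if pvScanLines (PySem.Str.splitlines text) false then true
      else shadow_mail_result_contract_reached_alt rest

-- ===== PRECONDITION & SPEC =====
def Spec_shadow_mail_result_contract_reached (surface_payloads : List (List (String × String))) (out : Bool) : Prop := out = shadow_mail_result_contract_reached_alt surface_payloads
instance (surface_payloads : List (List (String × String))) (out : Bool) : Decidable (Spec_shadow_mail_result_contract_reached surface_payloads out) := by unfold Spec_shadow_mail_result_contract_reached; infer_instance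

-- ===== CLAIM (what is proved, stated in full; the proofs are below) =====
def Claim_equal_shadow_mail_result_contract_reached : Prop := ∀ (surface_payloads : List (List (String × String))), Dom_shadow_mail_result_contract_reached surface_payloads → Spec_shadow_mail_result_contract_reached surface_payloads (shadow_mail_result_contract_reached surface_payloads)

-- ===== LEMMAS AND PROOFS =====

-- index-based view of B's line scan, to align with A's index loop
def pvScanFrom (lines : List String) (i : Nat) (seen : Bool) : Bool :=
  if _h : i < lines.length then
    if PySem.Str.strip (lines.getD i "") = MAIL_RESULT_BEGIN_SENTINEL then pvScanFrom lines (i + 1) true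
    else if PySem.Str.strip (lines.getD i "") = MAIL_RESULT_END_SENTINEL ∧ seen = true then true
    else pvScanFrom lines (i + 1) seen
  else false
termination_by lines.length - i

theorem pvScanFrom_succ (lines : List String) (i : Nat) (seen : Bool) (h : i < lines.length) :
    pvScanFrom lines i seen =
      if PySem.Str.strip (lines.getD i "") = MAIL_RESULT_BEGIN_SENTINEL then pvScanFrom lines (i + 1) true
      else if PySem.Str.strip (lines.getD i "") = MAIL_RESULT_END_SENTINEL ∧ seen = true then true
      else pvScanFrom lines (i + 1) seen := by
  rw [pvScanFrom]; simp [h]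

theorem pvScanFrom_stop (lines : List String) (i : Nat) (seen : Bool) (h : ¬ i < lines.length) :
    pvScanFrom lines i seen = false := by
  rw [pvScanFrom]; simp [h]

theorem pvScanFrom_eq (lines : List String) (i : Nat) (seen : Bool) :
    pvScanFrom lines i seen = pvScanLines (lines.drop i) seen := by
  fun_induction pvScanFrom lines i seen with
  | case1 i seen h hB ih =>
    rw [List.getD_eq_getElem lines "" h] at hB
    rw [List.drop_eq_getElem_cons h, pvScanLines]
    simp [hB, ih]
  | case2 i seen h hB hE =>
    rw [List.getD_eq_getElem lines "" h] at hB hE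
    rw [List.drop_eq_getElem_cons h, pvScanLines]
    simp [hE.1, hE.2]
    left
    unfold MAIL_RESULT_BEGIN_SENTINEL MAIL_RESULT_END_SENTINEL
    decide
  | case3 i seen h hB hE ih =>
    rw [List.getD_eq_getElem lines "" h] at hB hE
    rw [List.drop_eq_getElem_cons h, pvScanLines]
    simp [hB, hE, ih]
  | case4 i seen h =>
    rw [List.drop_eq_nil_of_le (by omega), pvScanLines]

theorem pvScanFrom_of_findEnd_some (lines : List String) (j k : Nat)
    (h : pvFindEnd lines j = some k) : pvScanFrom lines j true = true := by
  fun_induction pvFindEnd lines j with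
  | case1 j hj hEnd =>
    rw [pvScanFrom_succ lines j true hj]
    split_ifs with hB hE
    · -- a line cannot be both sentinels; here it is END, and the flag is already true…
      rw [hB] at hEnd; simp [MAIL_RESULT_BEGIN_SENTINEL, MAIL_RESULT_END_SENTINEL] at hEnd
    · rfl
    · exact absurd ⟨hEnd, rfl⟩ hE
  | case2 j hj hEnd ih =>
    rw [pvScanFrom_succ lines j true hj]
    split_ifs with hB hE
    · exact ih h
    · rfl
    · exact ih h
  | case3 j hj => simp at h

theorem pvScanFrom_of_findEnd_none (lines : List String) (j : Nat)
    (h : pvFindEnd lines j = none) : ∀ seen : Bool, pvScanFrom lines j seen = false := by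
  fun_induction pvFindEnd lines j with
  | case1 j hj hEnd => simp at h
  | case2 j hj hEnd ih =>
    intro seen
    rw [pvScanFrom_succ lines j seen hj]
    split_ifs with hB hE
    · exact ih h true
    · exact absurd hE.1 hEnd
    · exact ih h seen
  | case3 j hj => exact fun seen => pvScanFrom_stop lines j seen hj

theorem pvExtractLoop_empty_iff (lines : List String) (i : Nat) (blocks : List (Int × Int × String)) :
    (pvExtractLoop lines i blocks = [] ↔ blocks = [] ∧ pvScanFrom lines i false = false) := by
  fun_induction pvExtractLoop lines i blocks with
  | case1 i blocks h hB j hf payload ih =>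
    rw [ih]
    have hscan : pvScanFrom lines i false = true := by
      rw [pvScanFrom_succ lines i false h, if_pos hB]
      exact pvScanFrom_of_findEnd_some lines (i + 1) j hf
    simp [hscan]
  | case2 i blocks h hB hf ih =>
    rw [ih, pvScanFrom_succ lines i false h, if_pos hB,
      pvScanFrom_of_findEnd_none lines (i + 1) hf true,
      pvScanFrom_of_findEnd_none lines (i + 1) hf false]
  | case3 i blocks h hB ih =>
    rw [ih, pvScanFrom_succ lines i false h, if_neg hB, if_neg (by simp)]
  | case4 i blocks h =>
    rw [pvScanFrom_stop lines i false h]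
    simp

theorem extract_empty_iff (text : String) :
    (extract_sentinel_blocks text = [] ↔ pvScanLines (PySem.Str.splitlines text) false = false) := by
  rw [extract_sentinel_blocks, pvExtractLoop_empty_iff, pvScanFrom_eq]
  simp

theorem pv_main_eq (sps : List (List (String × String))) :
    shadow_mail_result_contract_reached sps = shadow_mail_result_contract_reached_alt sps := by
  induction sps with
  | nil => rfl
  | cons surface rest ih =>
    rw [shadow_mail_result_contract_reached, shadow_mail_result_contract_reached_alt]
    cases hget : (PySem.Dict.mk surface).get? "text" with
    | none => exact ih
    | some text =>
      by_cases hs : pvScanLines (PySem.Str.splitlines text) false = true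
      · have hne : ¬ extract_sentinel_blocks text = [] := by
          rw [extract_empty_iff]; simp [hs]
        simp [hne, hs]
      · have hsf : pvScanLines (PySem.Str.splitlines text) false = false := by
          simpa using hs
        have he : extract_sentinel_blocks text = [] := (extract_empty_iff text).mpr hsf
        simp [he, hsf, ih]

-- ===== VERDICT (by name: the statement is the Claim_ definition above) =====
theorem shadow_mail_result_contract_reached_spec : Claim_equal_shadow_mail_result_contract_reached :=
  fun sps _ => pv_main_eq sps
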